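-- pv_equiv track=rewrite | github.com/aude-ai/BehavioralPatternDiscovery | src/data/collection/parsers/github.py | _extract_repository
-- ===== SOURCE A (Python) =====
-- def _extract_repository(data: dict) -> str:
--     """Extract repository name from data or URL."""
--     if "repository" in data:
--         return data["repository"]
--
--     url = data.get("url", "") or data.get("html_url", "")
--     if "github.com" in url or "api.github.com" in url:
--         parts = url.split("/")
--         for i, part in enumerate(parts):
--             if part == "repos" and i + 2 < len(parts):
--                 return f"{parts[i+1]}/{parts[i+2]}"
--
--     return ""
-- ===== SOURCE B (Python) =====
-- def _extract_repository(data: dict) -> str: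
--     """Extract repository name from data or URL."""
--     if "repository" in data:
--         return data["repository"]
--
--     url = data.get("url", "") or data.get("html_url", "")
--     if "github.com" in url or "api.github.com" in url:
--         # Locate the "repos" path segment by substring search instead of
--         # splitting the whole URL: it is either the leading "repos/" or the
--         # first "/repos/" marker; only the tail after it is then split.
--         if url.startswith("repos/"):
--             tail = url[6:]
--         else:
--             k = url.find("/repos/")
--             if k == -1:
--                 return ""
--             tail = url[k + 7:]
--         pieces = tail.split("/")
--         if len(pieces) >= 2:
--             return f"{pieces[0]}/{pieces[1]}"
--
--     return ""
-- ===== Notes on version B (the rewrite author's own statement) =====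
-- stated objective: alternative
-- what changed: Instead of splitting the whole URL on '/' and scanning the segments with an indexed loop, B locates the repos marker by substring search (url.startswith('repos/') or url.find('/repos/')) and splits only the tail after it, taking its first two pieces; this is correct because only the first whole-segment 'repos' can ever have two following segments.
import Mathlib
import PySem

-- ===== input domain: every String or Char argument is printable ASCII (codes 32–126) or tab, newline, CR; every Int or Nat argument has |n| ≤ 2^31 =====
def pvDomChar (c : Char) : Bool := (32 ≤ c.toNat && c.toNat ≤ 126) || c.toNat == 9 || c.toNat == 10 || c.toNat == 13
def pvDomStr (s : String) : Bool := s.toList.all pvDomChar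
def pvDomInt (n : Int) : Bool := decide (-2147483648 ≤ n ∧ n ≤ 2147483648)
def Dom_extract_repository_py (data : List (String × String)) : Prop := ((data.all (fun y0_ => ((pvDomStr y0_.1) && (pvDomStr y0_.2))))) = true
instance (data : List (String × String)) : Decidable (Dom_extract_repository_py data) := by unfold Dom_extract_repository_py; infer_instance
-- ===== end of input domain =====

-- B replaces A's split-the-whole-URL + indexed scan by a substring search: the "repos"
-- segment is located as the leading "repos/" or the first "/repos/" marker, and only the
-- tail after it is split (alternative algorithm; same observable return value, proved below).

-- ===== PORT A =====
-- the 'for i, part in enumerate(parts)' loop; falling off the loop end returns ""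
-- (the .getD "" on pyGet? is unreachable: the guard i+2 < len(parts) keeps both indices in range)
def pvLoopA (parts : List String) : List (Int × String) → String
  | [] => ""
  | (i, part) :: rest =>
    if part == "repos" && decide (i + 2 < (parts.length : Int)) then
      ((PySem.List.pyGet? parts (i + 1)).getD "") ++ "/" ++ ((PySem.List.pyGet? parts (i + 2)).getD "")
    else pvLoopA parts rest

def extract_repository_py (data : List (String × String)) : String :=
  if (PySem.Dict.mk data).contains "repository" then
    ((PySem.Dict.mk data).get? "repository").getD ""
  else
    let u := (PySem.Dict.mk data).getD "url" ""
    let url := if u == "" then (PySem.Dict.mk data).getD "html_url" "" else u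
    if PySem.Str.isIn "github.com" url || PySem.Str.isIn "api.github.com" url then
      let parts := (PySem.Str.split? url "/").getD []   -- sep "/" ≠ "": split? is always some
      pvLoopA parts (PySem.List.enumerate parts)
    else ""

-- ===== PORT B =====
-- 'pieces = tail.split("/"); if len(pieces) >= 2: return f"{pieces[0]}/{pieces[1]}"; return ""'
def pvFromTail (tail : String) : String :=
  -- pieces = tail.split("/")   (sep "/" ≠ "": split? is always some)
  if 2 ≤ ((PySem.Str.split? tail "/").getD []).length then
    ((PySem.List.pyGet? ((PySem.Str.split? tail "/").getD []) 0).getD "") ++ "/" ++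
    ((PySem.List.pyGet? ((PySem.Str.split? tail "/").getD []) 1).getD "")
  else ""

def extract_repository_py_alt (data : List (String × String)) : String :=
  if (PySem.Dict.mk data).contains "repository" then
    ((PySem.Dict.mk data).get? "repository").getD ""
  else
    let u := (PySem.Dict.mk data).getD "url" ""
    let url := if u == "" then (PySem.Dict.mk data).getD "html_url" "" else u
    if PySem.Str.isIn "github.com" url || PySem.Str.isIn "api.github.com" url then
      -- 'if url.startswith("repos/"): tail = url[6:] else: k = url.find("/repos/");
      --  if k == -1: return ""    tail = url[k+7:]'   (Option models the early return "")
      let tail? : Option String :=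
        if PySem.Str.startswith url "repos/" then
          some (PySem.Str.slice url (some 6) none)
        else
          let k := PySem.Str.find url "/repos/"
          if k == -1 then none
          else some (PySem.Str.slice url (some (k + 7)) none)
      match tail? with
      | none => ""
      | some tail => pvFromTail tail
    else ""

-- ===== PRECONDITION & SPEC =====
def Spec_extract_repository_py (data : List (String × String)) (out : String) : Prop := out = extract_repository_py_alt data
instance (data : List (String × String)) (out : String) : Decidable (Spec_extract_repository_py data out) := by unfold Spec_extract_repository_py; infer_instance

-- ===== CLAIM (what is proved, stated in full; the proofs are below) =====
def Claim_equal_extract_repository_py : Prop := ∀ (data : List (String × String)), Dom_extract_repository_py data → Spec_extract_repository_py data (extract_repository_py data)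

-- ===== LEMMAS AND PROOFS =====

-- recursive form of Python's url.split("/")
def pvSplit : List Char → List (List Char)
  | [] => [[]]
  | c :: t => if c = '/' then [] :: pvSplit t
              else match pvSplit t with
                   | a :: as => (c :: a) :: as
                   | [] => [[c]]

-- "/".join: the inverse of pvSplit
def pvJoin : List (List Char) → List Char
  | [] => []
  | [p] => p
  | p :: ps => p ++ '/' :: pvJoin ps

def pvR : List Char := ['r', 'e', 'p', 'o', 's']
def pvR6 : List Char := ['r', 'e', 'p', 'o', 's', '/']
def pvPat : List Char := ['/', 'r', 'e', 'p', 'o', 's', '/']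

-- char-level form of B's tail handling: split the tail, take the first two pieces
def pvTail (t : List Char) : List Char :=
  match pvSplit t with
  | a :: b :: _ => a ++ '/' :: b
  | _ => []

-- char-level form of B's marker search
def pvB (cs : List Char) : List Char :=
  if PySem.Chars.startswith cs pvR6 then pvTail (cs.drop 6)
  else if PySem.Chars.find cs pvPat = -1 then []
  else pvTail (cs.drop (PySem.Chars.find cs pvPat + 7).toNat)

-- char-level form of A's scan over the segments
def pvScanC : List (List Char) → List Char
  | p :: o :: n :: rest => if p = pvR then o ++ '/' :: n else pvScanC (o :: n :: rest)
  | _ => []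

-- string-level form of A's scan
def pvScanS : List String → String
  | p :: o :: n :: rest => if p == "repos" then o ++ "/" ++ n else pvScanS (o :: n :: rest)
  | _ => ""

lemma pvSplit_ne_nil (l : List Char) : pvSplit l ≠ [] := by
  induction l with
  | nil => simp [pvSplit]
  | cons c t ih => simp only [pvSplit]; split; · simp
                   split <;> simp_all

-- PySem's fuel-based splitOn with sep "/" computes pvSplit
lemma pvGo_eq (fuel : Nat) : ∀ (l cur : List Char) (acc : List (List Char)), l.length < fuel →
    PySem.Chars.splitOn.go ['/'] fuel l cur acc
      = acc.reverse ++ (match pvSplit l with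
          | a :: as => (cur.reverse ++ a) :: as
          | [] => []) := by
  induction fuel with
  | zero => intro l cur acc h; omega
  | succ n ih =>
    intro l cur acc h
    match l with
    | [] => simp [PySem.Chars.splitOn.go, pvSplit]
    | c :: rest =>
      by_cases hc : c = '/'
      · subst hc
        rw [PySem.Chars.splitOn.go]
        simp only [List.isPrefixOf, beq_self_eq_true, Bool.true_and,
          if_true, List.length_cons, List.length_nil, List.drop_succ_cons, List.drop_zero]
        rw [ih rest [] (cur.reverse :: acc) (by simp at h; omega)]
        cases hs : pvSplit rest with
        | nil => exact absurd hs (pvSplit_ne_nil rest)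
        | cons a as => simp [pvSplit, hs]
      · rw [PySem.Chars.splitOn.go]
        have hpre : List.isPrefixOf ['/'] (c :: rest) = false := by
          simp [List.isPrefixOf]
          intro hh; exact hc hh.symm
        rw [hpre]
        simp only [Bool.false_eq_true, if_false]
        rw [ih rest (c :: cur) acc (by simp at h; omega)]
        cases hs : pvSplit rest with
        | nil => exact absurd hs (pvSplit_ne_nil rest)
        | cons a as => simp [pvSplit, hs, hc]

lemma pvSplitOn_eq_pvSplit (cs : List Char) : PySem.Chars.splitOn cs ['/'] = pvSplit cs := by
  rw [PySem.Chars.splitOn, pvGo_eq (cs.length + 1) cs [] [] (by omega)]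
  cases hs : pvSplit cs with
  | nil => exact absurd hs (pvSplit_ne_nil cs)
  | cons a as => simp

lemma pvJoin_pvSplit (cs : List Char) : pvJoin (pvSplit cs) = cs := by
  induction cs with
  | nil => simp [pvSplit, pvJoin]
  | cons c t ih =>
    simp only [pvSplit]
    by_cases hc : c = '/'
    · subst hc
      simp only [if_true]
      cases hs : pvSplit t with
      | nil => exact absurd hs (pvSplit_ne_nil t)
      | cons a as => rw [hs] at ih; simpa [pvJoin] using ih
    · simp only [hc, if_false]
      cases hs : pvSplit t with
      | nil => exact absurd hs (pvSplit_ne_nil t)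
      | cons a as =>
        rw [hs] at ih
        cases as with
        | nil => simpa [pvJoin] using ih
        | cons b bs => simpa [pvJoin] using ih

lemma pvSplit_slashfree (cs : List Char) : ∀ p ∈ pvSplit cs, '/' ∉ p := by
  induction cs with
  | nil => simp [pvSplit]
  | cons c t ih =>
    simp only [pvSplit]
    by_cases hc : c = '/'
    · subst hc; simpa using ih
    · simp only [hc, if_false]
      cases hs : pvSplit t with
      | nil => exact absurd hs (pvSplit_ne_nil t)
      | cons a as =>
        rw [hs] at ih
        intro p hp
        rcases List.mem_cons.mp hp with h | h
        · subst h
          intro hm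
          rcases List.mem_cons.mp hm with h' | h'
          · exact hc h'.symm
          · exact ih a (by simp) h'
        · exact ih p (by simp [h])

lemma pvSplit_slashfree_single (p : List Char) (hp : '/' ∉ p) : pvSplit p = [p] := by
  induction p with
  | nil => simp [pvSplit]
  | cons c t ih =>
    have hc : c ≠ '/' := fun h => hp (by simp [h])
    have ht : '/' ∉ t := fun h => hp (by simp [h])
    simp [pvSplit, hc, ih ht]

lemma pvSplit_seg (p x : List Char) (hp : '/' ∉ p) :
    pvSplit (p ++ '/' :: x) = p :: pvSplit x := by
  induction p with
  | nil => simp [pvSplit]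
  | cons c t ih =>
    have hc : c ≠ '/' := fun h => hp (by simp [h])
    have ht : '/' ∉ t := fun h => hp (by simp [h])
    simp [pvSplit, hc, ih ht]

lemma pvSplit_pvJoin (ps : List (List Char)) (hne : ps ≠ []) (hsf : ∀ p ∈ ps, '/' ∉ p) :
    pvSplit (pvJoin ps) = ps := by
  induction ps with
  | nil => exact absurd rfl hne
  | cons p ps' ih =>
    cases ps' with
    | nil => simpa [pvJoin] using pvSplit_slashfree_single p (hsf p (by simp))
    | cons q qs =>
      rw [show pvJoin (p :: q :: qs) = p ++ '/' :: pvJoin (q :: qs) from rfl,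
        pvSplit_seg p _ (hsf p (by simp)), ih (by simp) (fun r hr => hsf r (by simp [hr]))]

-- takeWhile tool: a slash-free block before a '/' is recovered exactly
lemma pvTakeWhile (a x : List Char) (ha : '/' ∉ a) :
    (a ++ '/' :: x).takeWhile (fun c => !(c == '/')) = a := by
  induction a with
  | nil => rw [List.nil_append, List.takeWhile_cons]; simp
  | cons c t ih =>
    have hc : c ≠ '/' := fun h => ha (by simp [h])
    have ht : '/' ∉ t := fun h => ha (by simp [h])
    rw [List.cons_append, List.takeWhile_cons, if_pos (by simp [hc]), ih ht]

-- two slash-free blocks before a '/' coincide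
lemma pvSegEq {a b x y : List Char} (ha : '/' ∉ a) (hb : '/' ∉ b)
    (h : a ++ '/' :: x = b ++ '/' :: y) : a = b := by
  have := congrArg (List.takeWhile (fun c => !(c == '/'))) h
  rwa [pvTakeWhile a x ha, pvTakeWhile b y hb] at this

-- find returns k when there is a match at k and none earlier
lemma pvFindEq (cs pat : List Char) (k : Nat) (h1 : pat <+: cs.drop k)
    (h2 : ∀ m < k, ¬ pat <+: cs.drop m) : PySem.Chars.find cs pat = k := by
  have hinf : pat <:+: cs := h1.isInfix.trans (List.drop_suffix _ _).isInfix
  have h0 : 0 ≤ PySem.Chars.find cs pat := (PySem.Chars.find_nonneg_iff cs pat).mpr hinf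
  obtain ⟨hp, hmin⟩ := PySem.Chars.find_spec h0
  rcases lt_trichotomy (PySem.Chars.find cs pat).toNat k with h | h | h
  · exact absurd hp (h2 _ h)
  · omega
  · exact absurd h1 (hmin k h)

-- pvPat starts with '/', so it is no prefix of a nonempty slash-free block ++ anything
lemma pvNoPatAtSeg {d x : List Char} (hd : d ≠ []) (hdf : '/' ∉ d) :
    ¬ pvPat <+: (d ++ x) := by
  rintro ⟨u, hu⟩
  match d, hd with
  | c :: d', _ =>
    simp only [pvPat, List.cons_append, List.cons.injEq] at hu
    exact hdf (by simp [← hu.1])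

-- no match of pvPat can start strictly inside the slash-free first segment
lemma pvNoMatchInside {p t : List Char} (hp : '/' ∉ p) {m : Nat} (hm : m < p.length) :
    ¬ pvPat <+: (p ++ '/' :: t).drop m := by
  rw [List.drop_append_of_le_length (by omega)]
  exact pvNoPatAtSeg (by intro h; have := congrArg List.length h; simp at this; omega)
    (fun hmem => hp (List.mem_of_mem_drop hmem))

lemma pvPatCons (t : List Char) : pvPat <+: ('/' :: t) ↔ pvR6 <+: t := by
  constructor
  · rintro ⟨u, hu⟩
    simp only [pvPat, List.cons_append, List.cons.injEq] at hu
    exact ⟨u, by simpa [pvR6] using hu.2⟩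
  · rintro ⟨u, hu⟩
    exact ⟨u, by simp [pvPat, pvR6] at hu ⊢; simpa using hu⟩

lemma pvScanC_cons_ne {p : List Char} (ps' : List (List Char)) (hp : p ≠ pvR) :
    pvScanC (p :: ps') = pvScanC ps' := by
  match ps' with
  | [] => rfl
  | [q] => rfl
  | q :: n :: rest => simp [pvScanC, hp]

-- THE CORE: on any segment list, B's marker search agrees with A's indexed scan
lemma pvMaster : ∀ ps : List (List Char), ps ≠ [] → (∀ p ∈ ps, '/' ∉ p) →
    pvB (pvJoin ps) = pvScanC ps := by
  intro ps
  induction ps with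
  | nil => intro h; exact absurd rfl h
  | cons p ps' ih =>
    intro _ hsf
    have hpf : '/' ∉ p := hsf p (by simp)
    cases ps' with
    | nil =>
      have hsw : ¬ pvR6 <+: p := fun h => hpf (h.subset (by simp [pvR6]))
      have hfind : PySem.Chars.find p pvPat = -1 :=
        (PySem.Chars.find_eq_neg_one_iff p pvPat).mpr
          (fun h => hpf (h.subset (by simp [pvPat])))
      simp only [pvJoin, pvB, pvScanC]
      rw [if_neg (by simp [PySem.Chars.startswith_iff]; exact hsw), if_pos hfind]
    | cons q qs =>
      have hne' : (q :: qs) ≠ [] := by simp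
      have hsf' : ∀ r ∈ q :: qs, '/' ∉ r := fun r hr => hsf r (by simp [hr])
      have ihs := ih hne' hsf'
      set t := pvJoin (q :: qs) with ht
      have hjoin : pvJoin (p :: q :: qs) = p ++ '/' :: t := rfl
      rw [hjoin]
      by_cases hp : p = pvR
      · subst hp
        have heq : pvR ++ '/' :: t = pvR6 ++ t := rfl
        have hsw : PySem.Chars.startswith (pvR ++ '/' :: t) pvR6 = true := by
          rw [PySem.Chars.startswith_iff, heq]; exact ⟨t, rfl⟩
        rw [pvB, if_pos hsw, heq]
        rw [show (pvR6 ++ t).drop 6 = t from List.drop_left (l₁ := pvR6)]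
        rw [pvTail, pvSplit_pvJoin (q :: qs) hne' hsf']
        cases qs with
        | nil => rfl
        | cons n rest => simp [pvScanC]
      · have hswf : ¬ pvR6 <+: (p ++ '/' :: t) := by
          rintro ⟨u, hu⟩
          have : pvR ++ '/' :: u = p ++ '/' :: t := by simpa [pvR6, pvR] using hu
          exact hp (pvSegEq (by decide) hpf this).symm
        rw [pvScanC_cons_ne _ hp, ← ihs]
        rw [pvB, if_neg (by simp [PySem.Chars.startswith_iff]; exact hswf)]
        by_cases hs : pvR6 <+: t
        · have hfind : PySem.Chars.find (p ++ '/' :: t) pvPat = p.length := by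
            apply pvFindEq
            · rw [show (p ++ '/' :: t).drop p.length = '/' :: t from List.drop_left]
              exact (pvPatCons t).mpr hs
            · exact fun m hm => pvNoMatchInside hpf hm
          rw [hfind, if_neg (by omega)]
          have hdrop : (p ++ '/' :: t).drop ((p.length : Int) + 7).toNat = t.drop 6 := by
            have h1 : ((p.length : Int) + 7).toNat = p.length + 7 := by omega
            rw [h1, show (p ++ '/' :: t) = p ++ ('/' :: t) from rfl,
              List.drop_length_add_append 7 (l₁ := p) (l₂ := '/' :: t),
              show (7:Nat) = 6 + 1 from rfl, List.drop_succ_cons]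
          rw [hdrop]
          rw [pvB, if_pos (by rw [PySem.Chars.startswith_iff]; exact hs)]
        · by_cases hj : pvPat <:+: t
          · have hj0 : 0 ≤ PySem.Chars.find t pvPat :=
              (PySem.Chars.find_nonneg_iff t pvPat).mpr hj
            obtain ⟨hjp, hjmin⟩ := PySem.Chars.find_spec hj0
            set j := (PySem.Chars.find t pvPat).toNat with hjdef
            have hfind : PySem.Chars.find (p ++ '/' :: t) pvPat = (p.length + 1 + j : Nat) := by
              apply pvFindEq
              · rw [show p.length + 1 + j = p.length + (1 + j) from by omega,
                  List.drop_length_add_append (1 + j) (l₁ := p) (l₂ := '/' :: t),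
                  show 1 + j = j + 1 from by omega, List.drop_succ_cons]
                exact hjp
              · intro m hm
                rcases lt_trichotomy m p.length with h | h | h
                · exact pvNoMatchInside hpf h
                · subst h
                  rw [show (p ++ '/' :: t).drop p.length = '/' :: t from List.drop_left]
                  exact fun hc => hs ((pvPatCons t).mp hc)
                · rw [show m = p.length + (1 + (m - p.length - 1)) from by omega,
                    List.drop_length_add_append (1 + (m - p.length - 1)) (l₁ := p) (l₂ := '/' :: t),
                    show 1 + (m - p.length - 1) = (m - p.length - 1) + 1 from by omega,
                    List.drop_succ_cons]
                  exact hjmin (m - p.length - 1) (by omega)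
            rw [hfind, if_neg (by omega)]
            have hdrop : (p ++ '/' :: t).drop (((p.length + 1 + j : Nat) : Int) + 7).toNat
                = t.drop (j + 7) := by
              rw [show (((p.length + 1 + j : Nat) : Int) + 7).toNat = p.length + (1 + (j + 7)) from by omega,
                List.drop_length_add_append (1 + (j + 7)) (l₁ := p) (l₂ := '/' :: t),
                show 1 + (j + 7) = (j + 7) + 1 from by omega, List.drop_succ_cons]
            rw [hdrop]
            rw [pvB, if_neg (by rw [PySem.Chars.startswith_iff]; simpa using hs),
              if_neg (by omega)]
            rw [show (PySem.Chars.find t pvPat + 7).toNat = j + 7 from by omega]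
          · have hjn : PySem.Chars.find t pvPat = -1 :=
              (PySem.Chars.find_eq_neg_one_iff t pvPat).mpr hj
            have hfind : PySem.Chars.find (p ++ '/' :: t) pvPat = -1 := by
              rw [PySem.Chars.find_eq_neg_one_iff]
              intro hinf
              obtain ⟨m, hm⟩ := (PySem.Chars.exists_prefix_drop_iff_isIn pvPat _).mpr
                ((PySem.Chars.isIn_iff_infix pvPat _).mpr hinf)
              rcases lt_trichotomy m p.length with h | h | h
              · exact pvNoMatchInside hpf h hm
              · subst h
                rw [show (p ++ '/' :: t).drop p.length = '/' :: t from List.drop_left] at hm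
                exact hs ((pvPatCons t).mp hm)
              · rw [show m = p.length + (1 + (m - p.length - 1)) from by omega,
                  List.drop_length_add_append (1 + (m - p.length - 1)) (l₁ := p) (l₂ := '/' :: t),
                  show 1 + (m - p.length - 1) = (m - p.length - 1) + 1 from by omega,
                  List.drop_succ_cons] at hm
                exact hj (hm.isInfix.trans (List.drop_suffix _ _).isInfix)
            rw [hfind, if_pos rfl]
            rw [pvB, if_neg (by rw [PySem.Chars.startswith_iff]; simpa using hs), hjn,
              if_pos rfl]

-- ===== bridging: String level ↔ List Char level =====

lemma pvBeqRepos (s : String) : (s == "repos") = decide (s.toList = pvR) := by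
  by_cases hs : s = "repos"
  · subst hs; decide
  · rw [beq_eq_false_iff_ne.mpr hs,
      decide_eq_false (fun hl => hs (String.toList_inj.mp (by rw [hl]; rfl)))]

lemma pvOfListSlash (a b : List Char) :
    String.ofList a ++ "/" ++ String.ofList b = String.ofList (a ++ '/' :: b) := by
  rw [show a ++ '/' :: b = a ++ (['/'] ++ b) from rfl, String.ofList_append, String.ofList_append,
    show String.ofList ['/'] = "/" from by decide, String.append_assoc]

lemma pvScanS_map : ∀ ps : List (List Char), pvScanS (ps.map String.ofList) = String.ofList (pvScanC ps)
  | [] => by decide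
  | [p] => by simp [pvScanS, pvScanC]
  | [p, q] => by simp [pvScanS, pvScanC]
  | p :: o :: n :: rest => by
      simp only [List.map_cons, pvScanS, pvScanC, pvBeqRepos, String.toList_ofList]
      by_cases h : p = pvR
      · simp [h, pvOfListSlash]
      · simp only [h, decide_false, Bool.false_eq_true, if_false]
        exact pvScanS_map (o :: n :: rest)

lemma pvGet0 {α : Type} [Inhabited α] (x0 x1 : α) (r : List α) :
    PySem.List.pyGet? (x0 :: x1 :: r) 0 = some x0 := by
  simp [PySem.List.pyGet?, PySem.List.pyIdx?]
  rw [if_pos (by omega)]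
  rfl

lemma pvGet1 {α : Type} [Inhabited α] (x0 x1 : α) (r : List α) :
    PySem.List.pyGet? (x0 :: x1 :: r) 1 = some x1 := by
  simp [PySem.List.pyGet?, PySem.List.pyIdx?]

-- url.split("/") computes pvSplit of the characters
lemma pvPartsEq (url : String) :
    (PySem.Str.split? url "/").getD [] = (pvSplit url.toList).map String.ofList := by
  rw [PySem.Str.split?]
  simp [PySem.Chars.split?, pvSplitOn_eq_pvSplit]

-- B's tail handling computes pvTail
lemma pvPiecesEq (tail : String) :
    pvFromTail tail = String.ofList (pvTail tail.toList) := by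
  rw [pvFromTail]
  rw [pvPartsEq]
  cases hs : pvSplit tail.toList with
  | nil => exact absurd hs (pvSplit_ne_nil _)
  | cons a as =>
    cases as with
    | nil => simp [pvTail, hs]
    | cons b bs =>
      rw [if_pos (by simp)]
      simp only [List.map_cons, pvGet0, pvGet1, Option.getD_some, pvTail, hs]
      exact pvOfListSlash a b

-- A's loop over enumerate equals the structural scan
lemma pvLoop_eq_scan (parts : List String) :
    ∀ (suf : List String) (k : Nat), suf = parts.drop k →
      pvLoopA parts (PySem.List.enumerate suf (k : Int)) = pvScanS suf := by
  intro suf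
  induction suf with
  | nil => intro k _; simp [PySem.List.enumerate_nil, pvLoopA, pvScanS]
  | cons s rest ih =>
    intro k hk
    have hdrop : parts.drop (k + 1) = rest := by
      have h1 : List.drop 1 (parts.drop k) = rest := by rw [← hk]; simp
      simpa [List.drop_drop, Nat.add_comm] using h1
    have hlen : parts.length = k + 1 + rest.length := by
      have h2 := congrArg List.length hk
      simp only [List.length_cons, List.length_drop] at h2
      omega
    have hcast : ((k : Int) + 1) = ((k + 1 : Nat) : Int) := by push_cast; ring
    rw [PySem.List.enumerate_cons, hcast]
    have hih := ih (k + 1) hdrop.symm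
    match rest, hdrop, hlen, hih with
    | [], hdrop, hlen, hih =>
      have hcond : ¬ ((k : Int) + 2 < (parts.length : Int)) := by
        rw [hlen]; simp only [List.length_nil]; push_cast; omega
      simp [pvLoopA, hcond, pvScanS]
    | [x], hdrop, hlen, hih =>
      have hcond : ¬ ((k : Int) + 2 < (parts.length : Int)) := by
        rw [hlen]; simp only [List.length_cons, List.length_nil]; push_cast; omega
      simp only [pvLoopA, hcond, decide_false, Bool.and_false]
      rw [hih]
      simp [pvScanS]
    | o :: n :: t, hdrop, hlen, hih =>
      have hcond : ((k : Int) + 2 < (parts.length : Int)) := by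
        rw [hlen]; simp only [List.length_cons]; push_cast; omega
      have hg1 : PySem.List.pyGet? parts ((k : Int) + 1) = some o := by
        rw [hcast, PySem.List.pyGet?_natCast]
        rw [show (k + 1) = (k + 1) + 0 by ring, ← List.getElem?_drop, hdrop]
        rfl
      have hg2 : PySem.List.pyGet? parts ((k : Int) + 2) = some n := by
        rw [show ((k : Int) + 2) = ((k + 1 + 1 : Nat) : Int) by push_cast; ring,
            PySem.List.pyGet?_natCast]
        rw [show (k + 1 + 1) = (k + 1) + 1 by ring, ← List.getElem?_drop, hdrop]
        rfl
      by_cases hsr : s = "repos"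
      · simp [pvLoopA, hsr, hcond, hg1, hg2, pvScanS]
      · simp only [pvLoopA, pvScanS, beq_eq_false_iff_ne.mpr hsr, Bool.false_and,
          Bool.false_eq_true, if_false]
        exact hih

-- B's branch computes pvB of the characters
set_option maxHeartbeats 1000000 in
lemma pvAltBranch (url : String) :
    (match (if PySem.Str.startswith url "repos/" then
              some (PySem.Str.slice url (some 6) none)
            else if PySem.Str.find url "/repos/" == -1 then none
            else some (PySem.Str.slice url (some (PySem.Str.find url "/repos/" + 7)) none)) with
     | none => ""
     | some tail => pvFromTail tail)
    = String.ofList (pvB url.toList) := by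
  have hsw : PySem.Str.startswith url "repos/" = PySem.Chars.startswith url.toList pvR6 := rfl
  have hfd : PySem.Str.find url "/repos/" = PySem.Chars.find url.toList pvPat := rfl
  by_cases h1 : PySem.Chars.startswith url.toList pvR6 = true
  · rw [hsw, if_pos h1]
    show pvFromTail (PySem.Str.slice url (some 6) none) = _
    rw [pvPiecesEq, pvB, if_pos h1]
    congr 2
    rw [PySem.Str.toList_slice, PySem.Chars.slice_eq_listSlice,
      PySem.List.slice_from _ (by norm_num)]
    rfl
  · rw [hsw, if_neg h1]
    rw [pvB, if_neg h1, hfd]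
    by_cases h2 : PySem.Chars.find url.toList pvPat = -1
    · rw [if_pos (by simp [h2]), if_pos h2]
    · rw [if_neg (by simp [h2]), if_neg h2]
      show pvFromTail (PySem.Str.slice url (some (PySem.Chars.find url.toList pvPat + 7)) none) = _
      rw [pvPiecesEq]
      have h0 : 0 ≤ PySem.Chars.find url.toList pvPat := by
        have := PySem.Chars.neg_one_le_find url.toList pvPat
        omega
      congr 2
      rw [PySem.Str.toList_slice, PySem.Chars.slice_eq_listSlice,
        PySem.List.slice_from _ (by omega)]

-- the github-guard branch of A equals the branch of B
lemma pvBranchEq (url : String) :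
    pvLoopA ((PySem.Str.split? url "/").getD []) (PySem.List.enumerate ((PySem.Str.split? url "/").getD []))
    = (match (if PySem.Str.startswith url "repos/" then
                some (PySem.Str.slice url (some 6) none)
              else if PySem.Str.find url "/repos/" == -1 then none
              else some (PySem.Str.slice url (some (PySem.Str.find url "/repos/" + 7)) none)) with
       | none => ""
       | some tail => pvFromTail tail) := by
  rw [pvAltBranch]
  have h0 : ((PySem.Str.split? url "/").getD []) = ((PySem.Str.split? url "/").getD []).drop 0 := rfl
  rw [show PySem.List.enumerate ((PySem.Str.split? url "/").getD [])
        = PySem.List.enumerate ((PySem.Str.split? url "/").getD []) ((0 : Nat) : Int) from rfl,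
    pvLoop_eq_scan _ _ 0 h0]
  rw [pvPartsEq, pvScanS_map, ← pvJoin_pvSplit url.toList]
  rw [pvMaster (pvSplit url.toList) (pvSplit_ne_nil _) (pvSplit_slashfree _), pvJoin_pvSplit]

-- ===== VERDICT (by name: the statement is the Claim_ definition above) =====
theorem extract_repository_py_spec : Claim_equal_extract_repository_py := by
  intro data _
  unfold Spec_extract_repository_py extract_repository_py extract_repository_py_alt
  cases hrep : (PySem.Dict.mk data).contains "repository" with
  | true => simp
  | false =>
    simp only [Bool.false_eq_true, if_false]
    split <;> split
    · exact pvBranchEq _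
    · rfl
    · exact pvBranchEq _
    · rfl
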